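-- pv_equiv track=rewrite | github.com/benquick123/code-profiling | code/batch-1/vse-naloge-brez-testov/DN6-M-29.py | prvi_tvit
-- ===== SOURCE A (Python) =====
-- import collections
--
-- def unikati(s):
--     rez = []
--     for i in s:
--         if i in rez:
--             pass
--         else:
--             rez.append(i)
--     return rez
--
-- def avtor(tvit):
--     novi = tvit.split(":")
--     return novi[0]
--
-- def vsi_avtorji(tviti):
--     p = []
--     for tvit in tviti:
--         a = avtor(tvit)
--         p.append(a)
--     p = unikati(p)
--     return p
--
-- def besedilo(tvit):
--     a = avtor(tvit)
--     od = a + ": "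
--     tv = tvit.lstrip(od)
--     return tv
--
-- def prvi_tvit(tviti):
--     slovar = collections.defaultdict(int)
--     a = vsi_avtorji(tviti)
--     for ime in a:
--         for tvit in tviti:
--             if avtor(tvit) == ime:
--                 slovar[ime] = besedilo(tvit)
--                 break
--     return slovar
-- ===== SOURCE B (Python) =====
-- def avtor(tvit):
--     return tvit.split(":")[0]
--
-- def besedilo(tvit):
--     return tvit.lstrip(avtor(tvit) + ": ")
--
-- def prvi_tvit(tviti):
--     slovar = {}
--     for tvit in tviti:
--         ime = avtor(tvit)
--         if ime not in slovar:
--             slovar[ime] = besedilo(tvit)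
--     return slovar
-- ===== Notes on version B (the rewrite author's own statement) =====
-- stated objective: faster
-- what changed: A deduplicates all authors and then rescans the whole tweet list for each author; B makes a single pass over the tweets, recording each author's text the first time the author is seen in a dict.
import Mathlib
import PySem

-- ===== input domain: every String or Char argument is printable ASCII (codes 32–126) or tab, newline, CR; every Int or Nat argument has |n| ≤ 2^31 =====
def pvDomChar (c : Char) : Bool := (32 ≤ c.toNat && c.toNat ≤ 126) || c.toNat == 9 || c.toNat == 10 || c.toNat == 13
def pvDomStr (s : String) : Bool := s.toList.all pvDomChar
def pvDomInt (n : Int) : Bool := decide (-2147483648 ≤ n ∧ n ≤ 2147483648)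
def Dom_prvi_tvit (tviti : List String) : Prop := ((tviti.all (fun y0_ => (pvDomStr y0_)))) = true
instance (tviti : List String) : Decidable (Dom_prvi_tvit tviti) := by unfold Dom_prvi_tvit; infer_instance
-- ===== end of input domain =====

-- B replaces A's per-author rescan of the whole tweet list by a single pass that records
-- each author's text the first time the author is seen (objective: faster).

-- ===== PORT A =====
-- avtor(tvit) = tvit.split(":")[0]
def pvAvtor (tvit : String) : String :=
  let novi := (PySem.Str.split? tvit ":").getD []
  PySem.List.pyGetD novi 0 ""

-- besedilo(tvit): od = avtor(tvit) + ": "; tvit.lstrip(od).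
-- lstrip with a chars argument is ported by hand (PySem covers only whitespace lstrip):
-- Python drops leading characters that occur in od — dropWhile membership is exact.
def pvBesedilo (tvit : String) : String :=
  let a := pvAvtor tvit
  let od := a ++ ": "
  String.ofList (tvit.toList.dropWhile (fun c => od.toList.contains c))

-- unikati: append each element not already in the accumulator
def pvUnikati (s : List String) : List String :=
  s.foldl (fun rez i => if rez.contains i then rez else rez ++ [i]) []

-- vsi_avtorji: collect the authors by appending, then unikati
def pvVsiAvtorji (tviti : List String) : List String :=
  pvUnikati (tviti.foldl (fun p tvit => p ++ [pvAvtor tvit]) [])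

-- inner loop 'for tvit in tviti: if avtor(tvit) == ime: slovar[ime] = besedilo(tvit); break'
def pvFindInsert (slovar : PySem.Dict String String) (ime : String) :
    List String → PySem.Dict String String
  | [] => slovar
  | tvit :: ts =>
      if pvAvtor tvit = ime then slovar.insert ime (pvBesedilo tvit)
      else pvFindInsert slovar ime ts

def prvi_tvit (tviti : List String) : List (String × String) :=
  let a := pvVsiAvtorji tviti
  (a.foldl (fun slovar ime => pvFindInsert slovar ime tviti) PySem.Dict.empty).items

-- ===== PORT B =====
def prvi_tvit_alt (tviti : List String) : List (String × String) :=
  (tviti.foldl (fun slovar tvit =>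
      let ime := pvAvtor tvit
      if slovar.contains ime then slovar else slovar.insert ime (pvBesedilo tvit))
    PySem.Dict.empty).items

-- ===== PRECONDITION & SPEC =====
def Spec_prvi_tvit (tviti : List String) (out : List (String × String)) : Prop := out = prvi_tvit_alt tviti
instance (tviti : List String) (out : List (String × String)) : Decidable (Spec_prvi_tvit tviti out) := by unfold Spec_prvi_tvit; infer_instance

-- ===== CLAIM (what is proved, stated in full; the proofs are below) =====
def Claim_equal_prvi_tvit : Prop := ∀ (tviti : List String), Dom_prvi_tvit tviti → Spec_prvi_tvit tviti (prvi_tvit tviti)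

-- ===== LEMMAS AND PROOFS =====

-- the text of the first tweet of a given author, as A's inner loop finds it
def pvBF (tviti : List String) (ime : String) : String :=
  match tviti.find? (fun t => decide (pvAvtor t = ime)) with
  | some t => pvBesedilo t
  | none => ""

theorem pvFindInsert_eq (slovar : PySem.Dict String String) (ime : String) (ts : List String) :
    pvFindInsert slovar ime ts =
      match ts.find? (fun t => decide (pvAvtor t = ime)) with
      | some t => slovar.insert ime (pvBesedilo t)
      | none => slovar := by
  induction ts with
  | nil => rfl
  | cons t ts ih =>
      by_cases h : pvAvtor t = ime
      · simp [pvFindInsert, h, List.find?_cons_of_pos]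
      · simp [pvFindInsert, h, ih]

theorem pvBF_cons_ne (t : String) (ts : List String) (x : String) (hne : ¬ pvAvtor t = x) :
    pvBF (t :: ts) x = pvBF ts x := by
  simp [pvBF, hne]

theorem pvUnikati_foldl (l s : List String) :
    l.foldl (fun rez i => if rez.contains i then rez else rez ++ [i]) s
      = s ++ (pvUnikati l).filter (fun x => !s.contains x) := by
  induction l generalizing s with
  | nil => simp [pvUnikati]
  | cons a l ih =>
      have hbase : pvUnikati (a :: l) = a :: (pvUnikati l).filter (fun x => !decide (x = a)) := by
        show List.foldl _ _ (a :: l) = _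
        rw [List.foldl_cons, ih]
        simp
      rw [List.foldl_cons, hbase]
      by_cases h : s.contains a = true
      · rw [if_pos h, ih, List.filter_cons, if_neg (by simp [(by simpa using h : a ∈ s)])]
        refine congrArg (s ++ ·) ?_
        rw [List.filter_filter]
        refine (List.filter_congr ?_).symm
        intro x _
        by_cases hxa : x = a
        · subst hxa
          have hm : x ∈ s := by simpa using h
          simp [hm]
        · simp [hxa]
      · rw [if_neg h, ih, List.filter_cons, if_pos (by simpa using h), List.append_assoc]
        refine congrArg (s ++ ·) ?_
        rw [List.singleton_append, List.filter_filter]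
        refine congrArg (a :: ·) ?_
        refine List.filter_congr ?_
        intro x _
        by_cases hs : x ∈ s <;> by_cases hxa : x = a <;> simp [hs, hxa]

theorem pvUnikati_cons (a : String) (l : List String) :
    pvUnikati (a :: l) = a :: (pvUnikati l).filter (fun x => !decide (x = a)) := by
  show List.foldl _ _ (a :: l) = _
  rw [List.foldl_cons, pvUnikati_foldl]
  simp

theorem mem_pvUnikati {x : String} {l : List String} : x ∈ pvUnikati l ↔ x ∈ l := by
  induction l with
  | nil => simp [pvUnikati]
  | cons a l ih =>
      rw [pvUnikati_cons]
      by_cases hxa : x = a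
      · subst hxa; simp
      · simp [hxa, List.mem_filter, ih]

theorem nodup_pvUnikati (l : List String) : (pvUnikati l).Nodup := by
  induction l with
  | nil => simp [pvUnikati]
  | cons a l ih =>
      rw [pvUnikati_cons]
      refine List.Nodup.cons ?_ (ih.filter _)
      intro hmem
      have := (List.mem_filter.mp hmem).2
      simp at this

-- A's outer loop over a nodup list of authors, each occurring among the tweets' authors
theorem a_fold (tviti : List String) :
    ∀ (as : List String) (d : PySem.Dict String String),
      as.Nodup →
      (∀ ime ∈ as, ime ∈ tviti.map pvAvtor) →
      (∀ ime ∈ as, d.contains ime = false) →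
      (as.foldl (fun slovar ime => pvFindInsert slovar ime tviti) d).items
        = d.items ++ as.map (fun ime => (ime, pvBF tviti ime)) := by
  intro as
  induction as with
  | nil => intro d _ _ _; simp
  | cons ime as ih =>
      intro d hnd hmem hfree
      obtain ⟨t0, ht0mem, ht0⟩ : ∃ t ∈ tviti, pvAvtor t = ime := by
        have := hmem ime (List.mem_cons_self ..)
        simpa using this
      obtain ⟨t, ht⟩ := Option.isSome_iff_exists.mp
        ((List.find?_isSome (p := fun t => decide (pvAvtor t = ime)) (xs := tviti)).mpr
          ⟨t0, ht0mem, decide_eq_true ht0⟩)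
      rw [List.foldl_cons, pvFindInsert_eq, ht]
      have hfree0 : d.contains ime = false := hfree ime (List.mem_cons_self ..)
      rw [ih (d.insert ime (pvBesedilo t)) hnd.of_cons
            (fun x hx => hmem x (List.mem_cons_of_mem _ hx))
            (fun x hx => by
              rw [PySem.Dict.contains_insert]
              have hne : x ≠ ime := by
                intro he; exact (List.nodup_cons.mp hnd).1 (he ▸ hx)
              simp [hne, hfree x (List.mem_cons_of_mem _ hx)])]
      rw [PySem.Dict.items_insert_of_not_contains d (pvBesedilo t) hfree0]
      have hbf : pvBF tviti ime = pvBesedilo t := by simp [pvBF, ht]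
      simp [hbf]

-- B's single pass over the tweets
theorem b_fold :
    ∀ (ts : List String) (d : PySem.Dict String String),
      (ts.foldl (fun slovar tvit =>
          let ime := pvAvtor tvit
          if slovar.contains ime then slovar else slovar.insert ime (pvBesedilo tvit)) d).items
        = d.items ++ ((pvUnikati (ts.map pvAvtor)).filter (fun ime => !d.contains ime)).map
            (fun ime => (ime, pvBF ts ime)) := by
  intro ts
  induction ts with
  | nil => intro d; simp [pvUnikati]
  | cons t ts ih =>
      intro d
      rw [List.foldl_cons, List.map_cons, pvUnikati_cons]
      by_cases h : d.contains (pvAvtor t) = true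
      · rw [if_pos h, ih, List.filter_cons, if_neg (by simp [h])]
        refine congrArg (d.items ++ ·) ?_
        rw [List.filter_filter]
        refine (List.map_congr_left ?_).trans (congrArg _ (List.filter_congr ?_)).symm
        · intro x hx
          have hne : ¬ pvAvtor t = x := by
            intro he
            have := (List.mem_filter.mp hx).2
            rw [← he] at this
            simp [h] at this
          rw [pvBF_cons_ne t ts x hne]
        · intro x _
          by_cases hxa : x = pvAvtor t
          · subst hxa; simp [h]
          · simp [hxa]
      · rw [if_neg h, ih,
          PySem.Dict.items_insert_of_not_contains d (pvBesedilo t) (by simpa using h),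
          List.filter_cons, if_pos (by simpa using h), List.append_assoc]
        refine congrArg (d.items ++ ·) ?_
        rw [List.singleton_append, List.map_cons]
        have hhead : pvBF (t :: ts) (pvAvtor t) = pvBesedilo t := by
          simp [pvBF]
        rw [hhead]
        refine congrArg _ ?_
        rw [List.filter_filter]
        refine (List.map_congr_left ?_).trans (congrArg _ (List.filter_congr ?_)).symm
        · intro x hx
          have hne : ¬ pvAvtor t = x := by
            intro he
            have := (List.mem_filter.mp hx).2
            rw [← he] at this
            simp at this
          rw [pvBF_cons_ne t ts x hne]
        · intro x _
          rw [PySem.Dict.contains_insert]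
          by_cases hxa : x = pvAvtor t
          · subst hxa; simp
          · simp [hxa, Bool.and_comm]

theorem pvVsiAvtorji_eq (tviti : List String) :
    pvVsiAvtorji tviti = pvUnikati (tviti.map pvAvtor) := by
  unfold pvVsiAvtorji
  rw [PySem.List.foldl_append_singleton_eq_map]
  simp

-- ===== VERDICT (by name: the statement is the Claim_ definition above) =====
theorem prvi_tvit_spec : Claim_equal_prvi_tvit := by
  intro tviti _
  unfold Spec_prvi_tvit prvi_tvit prvi_tvit_alt
  rw [pvVsiAvtorji_eq, b_fold,
      a_fold tviti (pvUnikati (tviti.map pvAvtor)) PySem.Dict.empty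
        (nodup_pvUnikati _) (fun _ h => mem_pvUnikati.mp h) (fun _ _ => rfl)]
  simp [PySem.Dict.empty]
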